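-- pv_equiv track=rewrite | github.com/ianmllr/abosammenligner | scrapers/callme_scraper.py | get_product_type_from_api_category
-- ===== SOURCE A (Python) =====
-- def get_product_type_from_api_category(api_category, product_name=""):
--     # CallMe's API has a very inconsistent productCategory field
--     if api_category == "handset":
--         # Could be a phone, gaming console, or smartwatch
--         name_lower = product_name.lower()
--         if any(x in name_lower for x in ["playstation", "ps5", "xbox", "nintendo", "switch"]):
--             return "gaming"
--         elif any(x in name_lower for x in ["watch", "smartwatch", "galaxy watch"]):
--             return "smartwatch"
--         elif any(x in name_lower for x in ["ipad", "tablet"]):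
--             return "tablet"
--         else:
--             return "phone"
--     elif api_category == "accessory":
--         # Audio, wearables, gaming accessories, etc.
--         name_lower = product_name.lower()
--         if any(x in name_lower for x in ["airpods", "earbuds", "headphones", "headset", "speaker", "beats", "boombox", "sonos", "jbl", "harman", "beyerdynamic"]):
--             return "audio"
--         elif any(x in name_lower for x in ["watch", "smartwatch", "galaxy watch", "pixel watch"]):
--             return "smartwatch"
--         elif any(x in name_lower for x in ["backbone", "controller", "gamepad"]):
--             return "gaming"
--         else:
--             return "accessory"
--     elif api_category == "tablet":
--         return "tablet"
--     elif api_category == "":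
--         # Blank category - likely tablets or larger devices
--         name_lower = product_name.lower()
--         if "ipad" in name_lower:
--             return "tablet"
--         elif any(x in name_lower for x in ["watch", "smartwatch"]):
--             return "smartwatch"
--         return "accessory"
--     else:
--         return "accessory"
-- ===== SOURCE B (Python) =====
-- # Two-stage: one flat keyword->tag extraction pass over the name, then per-category
-- # tag resolution; redundant watch keywords collapse to the single substring "watch".
-- _KEYWORDS = [
--     ("playstation", "console"), ("ps5", "console"), ("xbox", "console"),
--     ("nintendo", "console"), ("switch", "console"),
--     ("watch", "watch"),
--     ("ipad", "ipad"),
--     ("tablet", "tabkw"),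
--     ("airpods", "audio"), ("earbuds", "audio"), ("headphones", "audio"),
--     ("headset", "audio"), ("speaker", "audio"), ("beats", "audio"),
--     ("boombox", "audio"), ("sonos", "audio"), ("jbl", "audio"),
--     ("harman", "audio"), ("beyerdynamic", "audio"),
--     ("backbone", "pad"), ("controller", "pad"), ("gamepad", "pad"),
-- ]
--
-- _RESOLVE = {
--     "handset": ((("console", "gaming"), ("watch", "smartwatch"),
--                  ("ipad", "tablet"), ("tabkw", "tablet")), "phone"),
--     "accessory": ((("audio", "audio"), ("watch", "smartwatch"),
--                    ("pad", "gaming")), "accessory"),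
--     "": ((("ipad", "tablet"), ("watch", "smartwatch")), "accessory"),
-- }
--
-- def get_product_type_from_api_category(api_category, product_name=""):
--     if api_category == "tablet":
--         return "tablet"
--     name = product_name.lower()
--     tags = {tag for kw, tag in _KEYWORDS if kw in name}
--     ranking, default = _RESOLVE.get(api_category, ((), "accessory"))
--     hits = [res for tag, res in ranking if tag in tags]
--     return hits[0] if hits else default
-- ===== Notes on version B (the rewrite author's own statement) =====
-- stated objective: alternative
-- what changed: Replaces the per-category nested any()-cascades by a two-stage pipeline: one flat keyword->tag extraction pass over the name building a tag set (the redundant watch variants collapsed to the single substring 'watch'), followed by a per-category tag-ranking resolution, with unknown categories resolved by an empty ranking.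
import Mathlib
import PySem

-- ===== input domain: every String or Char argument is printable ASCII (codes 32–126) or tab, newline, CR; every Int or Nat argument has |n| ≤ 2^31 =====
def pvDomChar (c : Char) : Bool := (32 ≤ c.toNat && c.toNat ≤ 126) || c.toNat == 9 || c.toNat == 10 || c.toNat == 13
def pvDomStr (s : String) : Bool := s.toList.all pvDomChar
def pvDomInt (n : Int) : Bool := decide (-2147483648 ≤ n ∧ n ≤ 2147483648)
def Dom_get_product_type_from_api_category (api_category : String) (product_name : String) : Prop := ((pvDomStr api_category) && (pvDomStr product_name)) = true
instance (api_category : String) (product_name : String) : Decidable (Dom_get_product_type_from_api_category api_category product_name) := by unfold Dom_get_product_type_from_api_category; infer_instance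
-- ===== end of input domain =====

-- B replaces A's per-category any()-cascades by a two-stage pipeline: one flat
-- keyword->tag extraction pass over the name, then per-category tag-ranking
-- resolution (objective: alternative, same cost).

-- ===== PORT A =====
def get_product_type_from_api_category (api_category : String) (product_name : String) : String :=
  if api_category == "handset" then
    let name_lower := PySem.Str.lower product_name
    if (["playstation", "ps5", "xbox", "nintendo", "switch"].any fun x => PySem.Str.isIn x name_lower) then "gaming"
    else if (["watch", "smartwatch", "galaxy watch"].any fun x => PySem.Str.isIn x name_lower) then "smartwatch"
    else if (["ipad", "tablet"].any fun x => PySem.Str.isIn x name_lower) then "tablet"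
    else "phone"
  else if api_category == "accessory" then
    let name_lower := PySem.Str.lower product_name
    if (["airpods", "earbuds", "headphones", "headset", "speaker", "beats", "boombox", "sonos", "jbl", "harman", "beyerdynamic"].any fun x => PySem.Str.isIn x name_lower) then "audio"
    else if (["watch", "smartwatch", "galaxy watch", "pixel watch"].any fun x => PySem.Str.isIn x name_lower) then "smartwatch"
    else if (["backbone", "controller", "gamepad"].any fun x => PySem.Str.isIn x name_lower) then "gaming"
    else "accessory"
  else if api_category == "tablet" then "tablet"
  else if api_category == "" then
    let name_lower := PySem.Str.lower product_name
    if PySem.Str.isIn "ipad" name_lower then "tablet"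
    else if (["watch", "smartwatch"].any fun x => PySem.Str.isIn x name_lower) then "smartwatch"
    else "accessory"
  else "accessory"

-- ===== PORT B =====
-- stage 1 of Source B: flat keyword -> tag table
def pvKeywords : List (String × String) :=
  [ ("playstation", "console"), ("ps5", "console"), ("xbox", "console"),
    ("nintendo", "console"), ("switch", "console"),
    ("watch", "watch"),
    ("ipad", "ipad"),
    ("tablet", "tabkw"),
    ("airpods", "audio"), ("earbuds", "audio"), ("headphones", "audio"),
    ("headset", "audio"), ("speaker", "audio"), ("beats", "audio"),
    ("boombox", "audio"), ("sonos", "audio"), ("jbl", "audio"),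
    ("harman", "audio"), ("beyerdynamic", "audio"),
    ("backbone", "pad"), ("controller", "pad"), ("gamepad", "pad") ]

-- Source B's set comprehension: the tags whose keyword occurs in the lowered name
def pvTags (name : String) : PySem.Set String :=
  PySem.Set.ofList ((pvKeywords.filter (fun p => PySem.Str.isIn p.1 name)).map (fun p => p.2))

-- stage 2 of Source B: per-category tag ranking and default
def pvResolve : PySem.Dict String (List (String × String) × String) :=
  PySem.Dict.ofList
    [ ("handset", ([("console", "gaming"), ("watch", "smartwatch"),
                    ("ipad", "tablet"), ("tabkw", "tablet")], "phone")),
      ("accessory", ([("audio", "audio"), ("watch", "smartwatch"),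
                      ("pad", "gaming")], "accessory")),
      ("", ([("ipad", "tablet"), ("watch", "smartwatch")], "accessory")) ]

def get_product_type_from_api_category_alt (api_category : String) (product_name : String) : String :=
  if api_category == "tablet" then "tablet"
  else
    let tags := pvTags (PySem.Str.lower product_name)
    let rd := PySem.Dict.getD pvResolve api_category ([], "accessory")
    let hits := (rd.1.filter (fun p => PySem.Set.contains tags p.1)).map (fun p => p.2)
    match hits with
    | [] => rd.2
    | h :: _ => h

-- ===== PRECONDITION & SPEC =====
def Spec_get_product_type_from_api_category (api_category : String) (product_name : String) (out : String) : Prop := out = get_product_type_from_api_category_alt api_category product_name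
instance (api_category : String) (product_name : String) (out : String) : Decidable (Spec_get_product_type_from_api_category api_category product_name out) := by unfold Spec_get_product_type_from_api_category; infer_instance

-- ===== CLAIM =====
def Claim_equal_get_product_type_from_api_category : Prop := ∀ (api_category : String) (product_name : String), Dom_get_product_type_from_api_category api_category product_name → Spec_get_product_type_from_api_category api_category product_name (get_product_type_from_api_category api_category product_name)

-- ===== LEMMAS AND PROOFS =====

-- tag membership in the stage-1 set, as a scan of the flat keyword table
theorem pv_contains_tags (n t : String) :
    PySem.Set.contains (pvTags n) t
      = pvKeywords.any (fun p => PySem.Str.isIn p.1 n && p.2 == t) := by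
  rw [Bool.eq_iff_iff]
  simp [pvTags, PySem.Set.mem_ofList, List.mem_map,
        List.mem_filter, List.any_eq_true]

-- "watch" is an infix of every watch-variant keyword
theorem pv_isIn_of_infix (u v n : String) (hv : u.toList <:+: v.toList)
    (h : PySem.Str.isIn v n = true) : PySem.Str.isIn u n = true := by
  rw [PySem.Str.isIn_iff_infix] at h ⊢
  exact hv.trans h

theorem pv_tag_console (n : String) :
    PySem.Set.contains (pvTags n) "console"
      = (["playstation", "ps5", "xbox", "nintendo", "switch"].any fun x => PySem.Str.isIn x n) := by
  rw [pv_contains_tags]; simp [pvKeywords]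

theorem pv_tag_ipad (n : String) :
    PySem.Set.contains (pvTags n) "ipad" = PySem.Str.isIn "ipad" n := by
  rw [pv_contains_tags]; simp [pvKeywords]

theorem pv_tag_tabkw (n : String) :
    PySem.Set.contains (pvTags n) "tabkw" = PySem.Str.isIn "tablet" n := by
  rw [pv_contains_tags]; simp [pvKeywords]

theorem pv_tag_audio (n : String) :
    PySem.Set.contains (pvTags n) "audio"
      = (["airpods", "earbuds", "headphones", "headset", "speaker", "beats", "boombox", "sonos", "jbl", "harman", "beyerdynamic"].any fun x => PySem.Str.isIn x n) := by
  rw [pv_contains_tags]; simp [pvKeywords]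

theorem pv_tag_pad (n : String) :
    PySem.Set.contains (pvTags n) "pad"
      = (["backbone", "controller", "gamepad"].any fun x => PySem.Str.isIn x n) := by
  rw [pv_contains_tags]; simp [pvKeywords]

theorem pv_tag_watch (n : String) :
    PySem.Set.contains (pvTags n) "watch" = PySem.Str.isIn "watch" n := by
  rw [pv_contains_tags]; simp [pvKeywords]

-- the watch-variant lists of A collapse to the single "watch" test
theorem pv_watch2 (n : String) :
    (["watch", "smartwatch"].any fun x => PySem.Str.isIn x n) = PySem.Str.isIn "watch" n := by
  rw [Bool.eq_iff_iff]
  simp only [List.any_cons, List.any_nil, Bool.or_eq_true, Bool.or_false]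
  constructor
  · rintro (h | h)
    · exact h
    · exact pv_isIn_of_infix "watch" "smartwatch" n (by decide) h
  · exact Or.inl

theorem pv_watch3 (n : String) :
    (["watch", "smartwatch", "galaxy watch"].any fun x => PySem.Str.isIn x n) = PySem.Str.isIn "watch" n := by
  rw [Bool.eq_iff_iff]
  simp only [List.any_cons, List.any_nil, Bool.or_eq_true, Bool.or_false]
  constructor
  · rintro (h | h | h)
    · exact h
    · exact pv_isIn_of_infix "watch" "smartwatch" n (by decide) h
    · exact pv_isIn_of_infix "watch" "galaxy watch" n (by decide) h
  · exact Or.inl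

theorem pv_watch4 (n : String) :
    (["watch", "smartwatch", "galaxy watch", "pixel watch"].any fun x => PySem.Str.isIn x n) = PySem.Str.isIn "watch" n := by
  rw [Bool.eq_iff_iff]
  simp only [List.any_cons, List.any_nil, Bool.or_eq_true, Bool.or_false]
  constructor
  · rintro (h | h | h | h)
    · exact h
    · exact pv_isIn_of_infix "watch" "smartwatch" n (by decide) h
    · exact pv_isIn_of_infix "watch" "galaxy watch" n (by decide) h
    · exact pv_isIn_of_infix "watch" "pixel watch" n (by decide) h
  · exact Or.inl

-- literal lookups in the stage-2 table
theorem pv_resolve_handset : PySem.Dict.getD pvResolve "handset" ([], "accessory")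
    = ([("console", "gaming"), ("watch", "smartwatch"), ("ipad", "tablet"), ("tabkw", "tablet")], "phone") := by decide

theorem pv_resolve_accessory : PySem.Dict.getD pvResolve "accessory" ([], "accessory")
    = ([("audio", "audio"), ("watch", "smartwatch"), ("pad", "gaming")], "accessory") := by decide

theorem pv_resolve_blank : PySem.Dict.getD pvResolve "" ([], "accessory")
    = ([("ipad", "tablet"), ("watch", "smartwatch")], "accessory") := by decide

theorem pv_resolve_other (c : String) (h1 : c ≠ "handset") (h2 : c ≠ "accessory") (h3 : c ≠ "") :
    PySem.Dict.getD pvResolve c ([], "accessory") = ([], "accessory") := by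
  have hitems : pvResolve.items
      = [ ("handset", ([("console", "gaming"), ("watch", "smartwatch"),
                        ("ipad", "tablet"), ("tabkw", "tablet")], "phone")),
          ("accessory", ([("audio", "audio"), ("watch", "smartwatch"),
                          ("pad", "gaming")], "accessory")),
          ("", ([("ipad", "tablet"), ("watch", "smartwatch")], "accessory")) ] := by decide
  have e1 : ("handset" == c) = false := beq_eq_false_iff_ne.mpr (Ne.symm h1)
  have e2 : ("accessory" == c) = false := beq_eq_false_iff_ne.mpr (Ne.symm h2)
  have e3 : ("" == c) = false := beq_eq_false_iff_ne.mpr (Ne.symm h3)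
  simp [PySem.Dict.getD, PySem.Dict.get?, hitems, List.find?, e1, e2, e3]

-- B's filter-then-head scan equals the first-match right fold
theorem pv_first (f : String → Bool) (rs : List (String × String)) (d : String) :
    (match (rs.filter (fun p => f p.1)).map (fun p => p.2) with
      | [] => d
      | h :: _ => h)
      = rs.foldr (fun r acc => if f r.1 then r.2 else acc) d := by
  induction rs with
  | nil => rfl
  | cons r rs ih =>
      simp only [List.filter_cons, List.foldr_cons]
      by_cases h : f r.1 = true
      · simp [h]
      · simp only [Bool.not_eq_true] at h
        simp [h, ih]

-- ===== VERDICT =====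
theorem get_product_type_from_api_category_spec : Claim_equal_get_product_type_from_api_category := by
  intro c n _
  unfold Spec_get_product_type_from_api_category
  unfold get_product_type_from_api_category get_product_type_from_api_category_alt
  by_cases h1 : c = "handset"
  · subst h1
    simp only [beq_iff_eq, String.reduceEq, if_true, if_false]
    rw [pv_resolve_handset, pv_first]
    have hfold : ∀ (g : String → Bool),
        List.foldr (fun (r : String × String) acc => if g r.1 = true then r.2 else acc)
          ([("console", "gaming"), ("watch", "smartwatch"), ("ipad", "tablet"), ("tabkw", "tablet")], "phone").2
          ([("console", "gaming"), ("watch", "smartwatch"), ("ipad", "tablet"), ("tabkw", "tablet")], "phone").1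
        = (if g "console" = true then "gaming" else if g "watch" = true then "smartwatch"
           else if g "ipad" = true then "tablet" else if g "tabkw" = true then "tablet" else "phone") := fun g => rfl
    rw [hfold]
    rw [pv_tag_console, pv_tag_watch, pv_tag_ipad, pv_tag_tabkw, pv_watch3]
    by_cases hc : (["playstation", "ps5", "xbox", "nintendo", "switch"].any fun x => PySem.Str.isIn x (PySem.Str.lower n)) = true <;>
    by_cases hw : PySem.Str.isIn "watch" (PySem.Str.lower n) = true <;>
    by_cases hi : PySem.Str.isIn "ipad" (PySem.Str.lower n) = true <;>
    by_cases ht : PySem.Str.isIn "tablet" (PySem.Str.lower n) = true <;>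
    simp_all
  · by_cases h2 : c = "accessory"
    · subst h2
      simp only [beq_iff_eq, String.reduceEq, if_true, if_false]
      rw [pv_resolve_accessory, pv_first]
      have hfold : ∀ (g : String → Bool),
          List.foldr (fun (r : String × String) acc => if g r.1 = true then r.2 else acc)
            ([("audio", "audio"), ("watch", "smartwatch"), ("pad", "gaming")], "accessory").2
            ([("audio", "audio"), ("watch", "smartwatch"), ("pad", "gaming")], "accessory").1
          = (if g "audio" = true then "audio" else if g "watch" = true then "smartwatch"
             else if g "pad" = true then "gaming" else "accessory") := fun g => rfl
      rw [hfold]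
      rw [pv_tag_audio, pv_tag_watch, pv_tag_pad, pv_watch4]
    · by_cases h3 : c = "tablet"
      · subst h3; simp
      · by_cases h4 : c = ""
        · subst h4
          simp only [beq_iff_eq, String.reduceEq, if_true, if_false]
          rw [pv_resolve_blank, pv_first]
          have hfold : ∀ (g : String → Bool),
              List.foldr (fun (r : String × String) acc => if g r.1 = true then r.2 else acc)
                ([("ipad", "tablet"), ("watch", "smartwatch")], "accessory").2
                ([("ipad", "tablet"), ("watch", "smartwatch")], "accessory").1
              = (if g "ipad" = true then "tablet" else if g "watch" = true then "smartwatch"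
                 else "accessory") := fun g => rfl
          rw [hfold]
          rw [pv_tag_ipad, pv_tag_watch, pv_watch2]
        · rw [pv_resolve_other c h1 h2 h4, pv_first]
          simp [h1, h2, h3, h4]
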